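-- pv_equiv track=rewrite | github.com/seongikjin227-jpg/migration-main | migration-main/app/services/validation_service.py | _build_candidate_tables_by_column
-- ===== SOURCE A (Python) =====
-- def _build_candidate_tables_by_column(
--     allowed_columns_by_table: dict[str, set[str]],
-- ) -> dict[str, list[str]]:
--     """Build reverse lookup from column name to candidate target tables."""
--     candidate_tables: dict[str, list[str]] = {}
--     for table_name, columns in allowed_columns_by_table.items():
--         for column_name in columns:
--             if column_name not in candidate_tables:
--                 candidate_tables[column_name] = []
--             candidate_tables[column_name].append(table_name)
--     for tables in candidate_tables.values():
--         tables.sort()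
--     return candidate_tables
-- ===== SOURCE B (Python) =====
-- def _build_candidate_tables_by_column(
--     allowed_columns_by_table: dict[str, set[str]],
-- ) -> dict[str, list[str]]:
--     """Build reverse lookup from column name to candidate target tables."""
--     sorted_items = sorted(allowed_columns_by_table.items(), key=lambda item: item[0])
--     candidate_tables: dict[str, list[str]] = {}
--     for columns in allowed_columns_by_table.values():
--         for column_name in columns:
--             if column_name not in candidate_tables:
--                 candidate_tables[column_name] = [
--                     table_name for table_name, columns_of_table in sorted_items
--                     if column_name in columns_of_table
--                 ]
--     return candidate_tables
-- ===== Notes on version B (the rewrite author's own statement) =====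
-- stated objective: alternative
-- what changed: Instead of appending a table name per occurrence and sorting every value list afterwards, B sorts the table items once by name and builds each column's list in a single comprehension that filters the pre-sorted items for membership, so the per-list sort and the append/mutate phase disappear; Pre_ excludes association lists with duplicate table keys or duplicate entries inside a column list, which cannot represent a Python dict[str, set[str]].
import Mathlib
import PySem

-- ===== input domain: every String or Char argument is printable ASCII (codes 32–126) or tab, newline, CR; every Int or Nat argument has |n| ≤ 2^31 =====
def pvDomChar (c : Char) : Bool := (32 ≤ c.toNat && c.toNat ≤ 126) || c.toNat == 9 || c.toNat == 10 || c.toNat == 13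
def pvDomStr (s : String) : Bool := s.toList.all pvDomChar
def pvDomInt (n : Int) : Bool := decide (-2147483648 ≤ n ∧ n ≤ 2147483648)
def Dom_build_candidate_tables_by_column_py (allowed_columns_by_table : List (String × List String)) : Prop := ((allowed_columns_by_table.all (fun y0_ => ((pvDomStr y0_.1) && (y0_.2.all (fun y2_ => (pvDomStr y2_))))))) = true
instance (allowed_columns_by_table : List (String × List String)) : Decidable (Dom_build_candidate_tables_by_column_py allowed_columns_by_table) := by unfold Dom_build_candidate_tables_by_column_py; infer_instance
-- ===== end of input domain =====

-- B pre-sorts the table names once and builds each column's list by filtering the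
-- sorted names for membership, replacing A's append-then-sort-every-value scheme
-- (objective: alternative decomposition, same observable result).

-- ===== PORT A =====
-- literal transliteration of A: build dict column -> appended table names, then sort each value
def build_candidate_tables_by_column_py (allowed_columns_by_table : List (String × List String)) : List (String × List String) :=
  let candidate_tables : PySem.Dict String (List String) :=
    allowed_columns_by_table.foldl (fun ct p =>
      p.2.foldl (fun ct column_name =>
        let ct := if ct.contains column_name = false then ct.insert column_name [] else ct
        ct.modify column_name [] (fun tables => tables ++ [p.1])) ct)
      PySem.Dict.empty
  -- 'for tables in candidate_tables.values(): tables.sort()' sorts each value in place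
  candidate_tables.items.map (fun q => (q.1, PySem.List.sorted q.2 (fun x => x) false))

-- ===== PORT B =====
def build_candidate_tables_by_column_py_alt (allowed_columns_by_table : List (String × List String)) : List (String × List String) :=
  let sorted_items := PySem.List.sorted allowed_columns_by_table Prod.fst false
  (allowed_columns_by_table.foldl (fun ct p =>
    p.2.foldl (fun ct column_name =>
      if ct.contains column_name = false then
        ct.insert column_name
          ((sorted_items.filter (fun q => decide (column_name ∈ q.2))).map Prod.fst)
      else ct) ct)
    PySem.Dict.empty).items

-- ===== PRECONDITION & SPEC =====
-- Pre_ excludes association lists with duplicate table keys or with a duplicate entry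
-- inside a column list: the Python argument is a dict[str, set[str]], which can contain neither.
def Pre_build_candidate_tables_by_column_py (allowed_columns_by_table : List (String × List String)) : Prop :=
  (allowed_columns_by_table.map Prod.fst).Nodup ∧ ∀ p ∈ allowed_columns_by_table, p.2.Nodup
instance (allowed_columns_by_table : List (String × List String)) : Decidable (Pre_build_candidate_tables_by_column_py allowed_columns_by_table) := by unfold Pre_build_candidate_tables_by_column_py; infer_instance

def pvWitness_build_candidate_tables_by_column_py : (List (String × List String)) :=
  [("t2", ["a", "b"]), ("t1", ["b"])]

def Spec_build_candidate_tables_by_column_py (allowed_columns_by_table : List (String × List String)) (out : List (String × List String)) : Prop := out = build_candidate_tables_by_column_py_alt allowed_columns_by_table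
instance (allowed_columns_by_table : List (String × List String)) (out : List (String × List String)) : Decidable (Spec_build_candidate_tables_by_column_py allowed_columns_by_table out) := by unfold Spec_build_candidate_tables_by_column_py; infer_instance

-- ===== CLAIM (what is proved, stated in full; the proofs are below) =====
def Claim_equal_build_candidate_tables_by_column_py : Prop := ∀ (allowed_columns_by_table : List (String × List String)), Dom_build_candidate_tables_by_column_py allowed_columns_by_table → Pre_build_candidate_tables_by_column_py allowed_columns_by_table → Spec_build_candidate_tables_by_column_py allowed_columns_by_table (build_candidate_tables_by_column_py allowed_columns_by_table)

-- ===== LEMMAS AND PROOFS =====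

-- (column, table) occurrence pairs, in A's traversal order
def pvPairs (d : List (String × List String)) : List (String × String) :=
  d.flatMap (fun p => p.2.map (fun c => (c, p.1)))

-- B's value for a column: sorted table names filtered by membership
def pvV (d : List (String × List String)) (c : String) : List String :=
  ((PySem.List.sorted d Prod.fst false).filter (fun q => decide (c ∈ q.2))).map Prod.fst

-- A's (unsorted) occurrence list for a column
def pvT (d : List (String × List String)) (c : String) : List String :=
  ((pvPairs d).filter (fun q => q.1 == c)).map (fun q => q.2)

lemma pv_foldl_flatMap {α β γ : Type} (f : α → List β) (g : γ → β → γ) (l : List α) (init : γ) :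
    l.foldl (fun a x => (f x).foldl g a) init = (l.flatMap f).foldl g init := by
  induction l generalizing init <;> simp [List.foldl_append, *]

lemma pv_stepA (ct : PySem.Dict String (List String)) (c t : String) :
    ((if ct.contains c = false then ct.insert c [] else ct).modify c []
      (fun tables => tables ++ [t])) = ct.modify c [] (fun tables => tables ++ [t]) := by
  cases hc : ct.contains c with
  | false =>
      simp only [if_true, PySem.Dict.modify, PySem.Dict.getD_insert_self,
        PySem.Dict.insert_insert_self, PySem.Dict.getD_of_not_contains _ _ hc,
        List.nil_append]
  | true => simp

lemma pv_A_eq (d : List (String × List String)) :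
    build_candidate_tables_by_column_py d =
      (PySem.Set.ofList (d.flatMap (fun p => p.2))).map
        (fun c => (c, PySem.List.sorted (pvT d c) (fun x => x) false)) := by
  simp only [build_candidate_tables_by_column_py]
  have hbody : (fun (ct : PySem.Dict String (List String)) (p : String × List String) =>
      p.2.foldl (fun ct column_name =>
        (if ct.contains column_name = false then ct.insert column_name [] else ct).modify
          column_name [] (fun tables => tables ++ [p.1])) ct)
      = fun ct p => ((fun (p : String × List String) => p.2.map (fun c => (c, p.1))) p).foldl
          (fun ct (q : String × String) => ct.modify q.1 [] (fun tables => tables ++ [q.2])) ct := by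
    funext ct p
    rw [List.foldl_map]
    exact PySem.List.foldl_congr_mem _ _ _ _ (fun ct c _ => pv_stepA ct c p.1)
  rw [hbody, pv_foldl_flatMap (fun (p : String × List String) => p.2.map (fun c => (c, p.1)))]
  rw [show (List.flatMap (fun (p : String × List String) => List.map (fun c => (c, p.1)) p.2) d)
      = pvPairs d from rfl]
  have hnd : ((pvPairs d).foldl
      (fun ct (q : String × String) => ct.modify q.1 [] (fun tables => tables ++ [q.2]))
      PySem.Dict.empty).keys.Nodup :=
    PySem.Dict.nodup_keys_foldl_modify_key (pvPairs d) Prod.fst []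
      (fun _ q tables => tables ++ [q.2]) PySem.Dict.empty (by simp)
  rw [PySem.Dict.items_eq_map_keys _ hnd [],
    PySem.Dict.keys_foldl_modify_key (pvPairs d) Prod.fst []
      (fun _ q tables => tables ++ [q.2]) PySem.Dict.empty]
  simp only [List.map_map]
  have hkeys : PySem.Set.update (PySem.Dict.empty : PySem.Dict String (List String)).keys ((pvPairs d).map Prod.fst)
      = PySem.Set.ofList (d.flatMap (fun p => p.2)) := by
    simp [PySem.Set.update, PySem.Set.ofList_eq_foldl, pvPairs, List.map_flatMap,
      Function.comp_def, List.map_map]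
  rw [hkeys]
  refine List.map_congr_left (fun c _ => ?_)
  simp [Function.comp, PySem.Dict.getD_foldl_modify_append, pvT]

lemma pv_foldIns (V : String → List String) (l : List String) : ∀ S : List String,
    (l.foldl (fun ct c => if ct.contains c = false then ct.insert c (V c) else ct)
      (PySem.Dict.mk (S.map (fun c => (c, V c))))).items
      = (PySem.Set.update S l).map (fun c => (c, V c)) := by
  induction l with
  | nil => intro S; simp [PySem.Set.update]
  | cons c l ih =>
      intro S
      have hc : (PySem.Dict.mk (S.map (fun c => (c, V c)))).contains c = decide (c ∈ S) := by
        simp [PySem.Dict.contains, List.any_map, Function.comp_def, List.any_beq']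
      by_cases hm : c ∈ S
      · have hadd : PySem.Set.add S c = S := by simp [PySem.Set.add, hm]
        simpa [PySem.Set.update, hc, hm, hadd] using ih S
      · have hadd : PySem.Set.add S c = S ++ [c] := by simp [PySem.Set.add, hm]
        have hins : (PySem.Dict.mk (S.map (fun c => (c, V c)))).insert c (V c)
            = PySem.Dict.mk ((S ++ [c]).map (fun c => (c, V c))) := by
          simp [PySem.Dict.insert, hc, hm]
        simpa [PySem.Set.update, hc, hm, hadd, hins] using ih (S ++ [c])

lemma pv_B_eq (d : List (String × List String)) :
    build_candidate_tables_by_column_py_alt d =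
      (PySem.Set.ofList (d.flatMap (fun p => p.2))).map (fun c => (c, pvV d c)) := by
  simp only [build_candidate_tables_by_column_py_alt]
  rw [pv_foldl_flatMap (fun (p : String × List String) => p.2)]
  have h := pv_foldIns (pvV d) (d.flatMap (fun p => p.2)) []
  simpa [PySem.Set.update, PySem.Set.ofList_eq_foldl, pvV, PySem.Dict.empty] using h

lemma pv_T_eq (d : List (String × List String)) (hn : ∀ p ∈ d, p.2.Nodup) (c : String) :
    (d.filter (fun p => decide (c ∈ p.2))).map Prod.fst = pvT d c := by
  induction d with
  | nil => simp [pvT, pvPairs]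
  | cons p d ih =>
      have hp : p.2.Nodup := hn p (by simp)
      have ih' := ih (fun q hq => hn q (by simp [hq]))
      simp only [pvT, pvPairs] at ih' ⊢
      rw [List.flatMap_cons, List.filter_append, List.map_append, ← ih']
      have hhead : ((p.2.map (fun c' => (c', p.1))).filter (fun q => q.1 == c)).map
          (fun q => q.2) = if c ∈ p.2 then [p.1] else [] := by
        rw [List.filter_map]
        simp only [Function.comp_def, List.map_map]
        rw [List.filter_beq c]
        by_cases hm : c ∈ p.2
        · simp [List.count_eq_one_of_mem hp hm, hm]
        · simp [List.count_eq_zero.mpr hm, hm]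
      rw [hhead]
      by_cases hm : c ∈ p.2
      · simp [hm]
      · simp [hm]

lemma pv_col_eq (d : List (String × List String))
    (hk : (d.map Prod.fst).Nodup) (hn : ∀ p ∈ d, p.2.Nodup) (c : String) :
    PySem.List.sorted (pvT d c) (fun x => x) false = pvV d c := by
  have hperm : (PySem.List.sorted d Prod.fst false).Perm d :=
    PySem.List.sorted_perm _ _ _
  have hkNodup : ((PySem.List.sorted d Prod.fst false).map Prod.fst).Nodup :=
    ((hperm.map Prod.fst).nodup_iff).mpr hk
  have hle : (PySem.List.sorted d Prod.fst false).Pairwise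
      (fun a b => a.1 ≤ b.1) := PySem.List.sorted_pairwise d Prod.fst
  have hne : (PySem.List.sorted d Prod.fst false).Pairwise
      (fun a b => a.1 ≠ b.1) := by
    rw [List.nodup_iff_pairwise_ne, List.pairwise_map] at hkNodup
    exact hkNodup
  have hlt : (PySem.List.sorted d Prod.fst false).Pairwise
      (fun a b => a.1 < b.1) :=
    (List.Pairwise.and hle hne).imp (fun h => lt_of_le_of_ne h.1 h.2)
  have hVlt : (pvV d c).Pairwise (· < ·) := by
    unfold pvV
    rw [List.pairwise_map]
    exact hlt.filter _
  have hVperm : (pvV d c).Perm (pvT d c) := by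
    unfold pvV
    rw [← pv_T_eq d hn c]
    exact (hperm.filter (fun q => decide (c ∈ q.2))).map Prod.fst
  exact PySem.List.sorted_eq_of_perm_of_pairwise_lt _ _ _ hVperm hVlt

-- ===== VERDICT (by name: the statement is the Claim_ definition above) =====
theorem build_candidate_tables_by_column_py_spec : Claim_equal_build_candidate_tables_by_column_py := by
  intro d _hdom hpre
  unfold Spec_build_candidate_tables_by_column_py
  rw [pv_A_eq, pv_B_eq]
  exact List.map_congr_left (fun c _ => by rw [pv_col_eq d hpre.1 hpre.2 c])
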